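-- pv_equiv track=rewrite | github.com/BoxRight/pyramid2 | zdd_query.py | dependency_measure
-- ===== SOURCE A (Python) =====
-- from typing import List, Set, Dict, Tuple, Optional, Any
--
-- def dependency_measure(X: int, team: List[List[int]]) -> int:
--     """Measures how much team collapses when variable X is removed"""
--     original_size = len(team)
--
--     team_without_X = []
--     for vector in team:
--         v_without_X = [v for v in vector if v != X]
--         if v_without_X not in team_without_X:
--             team_without_X.append(v_without_X)
--
--     return original_size - len(team_without_X)
-- ===== SOURCE B (Python) =====
-- def dependency_measure(X, team):
--     """Measures how much team collapses when variable X is removed"""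
--     pending = [tuple(v for v in vector if v != X) for vector in team]
--     dup = 0
--     while pending:
--         k = pending[0]
--         rest = [t for t in pending[1:] if t != k]
--         dup += len(pending) - 1 - len(rest)
--         pending = rest
--     return dup
-- ===== Notes on version B (the rewrite author's own statement) =====
-- stated objective: alternative
-- what changed: Replaces A's dedup-list with per-vector membership scan by a worklist elimination loop: repeatedly take the first reduced key, filter out all its copies from the pending list, and accumulate the number of copies removed.
import Mathlib
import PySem

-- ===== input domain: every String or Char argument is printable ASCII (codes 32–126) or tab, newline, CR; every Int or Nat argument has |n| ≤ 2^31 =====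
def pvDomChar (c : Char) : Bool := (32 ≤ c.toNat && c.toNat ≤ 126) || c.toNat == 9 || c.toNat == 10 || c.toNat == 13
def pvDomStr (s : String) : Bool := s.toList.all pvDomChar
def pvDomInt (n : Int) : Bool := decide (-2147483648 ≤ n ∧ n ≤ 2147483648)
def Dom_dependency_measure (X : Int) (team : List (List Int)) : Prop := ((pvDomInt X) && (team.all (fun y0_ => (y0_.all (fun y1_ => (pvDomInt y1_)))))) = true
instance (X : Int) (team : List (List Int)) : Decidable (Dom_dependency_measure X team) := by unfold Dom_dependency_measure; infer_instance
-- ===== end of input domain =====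

-- ===== PORT A =====
-- B replaces A's dedup-list (membership scan per vector) by a worklist loop that
-- repeatedly removes the whole group of the first pending key, summing removed copies.
def dependency_measure (X : Int) (team : List (List Int)) : Int :=
  let originalSize : Int := team.length
  let teamWithoutX : List (List Int) :=
    team.foldl (fun acc vector =>
      let vWithoutX := vector.filter (fun v => v != X)
      if vWithoutX ∉ acc then acc ++ [vWithoutX] else acc) []
  originalSize - teamWithoutX.length

-- ===== PORT B =====
-- the while loop of Source B: pending list of reduced keys, dup accumulator
def dmGo : List (List Int) → Int → Int
  | [], dup => dup
  | k :: rest0, dup =>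
    dmGo (rest0.filter (fun t => t != k))
      (dup + (((k :: rest0).length : Int) - 1 - ((rest0.filter (fun t => t != k)).length : Int)))
termination_by pending _ => pending.length
decreasing_by
  have h := List.length_filter_le (fun (x : {x // x ∈ rest0}) => ↑x != k) rest0.attach
  have h2 := List.length_filter_le (fun t => t != k) rest0
  simp at h h2 ⊢
  omega

def dependency_measure_alt (X : Int) (team : List (List Int)) : Int :=
  dmGo (team.map (fun vector => vector.filter (fun v => v != X))) 0

-- ===== PRECONDITION & SPEC =====
def Spec_dependency_measure (X : Int) (team : List (List Int)) (out : Int) : Prop := out = dependency_measure_alt X team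
instance (X : Int) (team : List (List Int)) (out : Int) : Decidable (Spec_dependency_measure X team out) := by unfold Spec_dependency_measure; infer_instance

-- ===== CLAIM (what is proved, stated in full; the proofs are below) =====
def Claim_equal_dependency_measure : Prop := ∀ (X : Int) (team : List (List Int)), Dom_dependency_measure X team → Spec_dependency_measure X team (dependency_measure X team)

-- ===== LEMMAS AND PROOFS =====

-- A's dedup loop is exactly building the set of reduced vectors in first-insertion order
lemma dedup_loop_eq_setOfList (X : Int) (team : List (List Int)) :
    team.foldl (fun acc vector =>
      let vWithoutX := vector.filter (fun v => v != X)
      if vWithoutX ∉ acc then acc ++ [vWithoutX] else acc) [] =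
    PySem.Set.ofList (team.map (fun v => v.filter (fun x => x != X))) := by
  rw [PySem.Set.ofList_eq_foldl, List.foldl_map]
  congr 1
  funext acc x
  by_cases h : List.filter (fun v => v != X) x ∈ acc
  · simp [h]
  · simp [h]

-- the length of the ordered dedup is the number of distinct elements
lemma len_ofList_eq_card (xs : List (List Int)) :
    (PySem.Set.ofList xs).length = xs.toFinset.card := by
  have hfs : (PySem.Set.ofList xs).toFinset = xs.toFinset := by
    ext a; simp [PySem.Set.mem_ofList]
  rw [← hfs, List.toFinset_card_of_nodup (PySem.Set.nodup_ofList xs)]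

-- removing the whole first group drops the distinct count by exactly one
lemma card_cons_filter (k : List Int) (t : List (List Int)) :
    (k :: t).toFinset.card = (t.filter (fun x => x != k)).toFinset.card + 1 := by
  have hf : (t.filter (fun x => x != k)).toFinset = t.toFinset.erase k := by
    ext a
    simp [Finset.mem_erase, bne_iff_ne, and_comm]
  rw [hf, List.toFinset_cons]
  by_cases hk : k ∈ t.toFinset
  · rw [Finset.insert_eq_self.mpr hk, Finset.card_erase_add_one hk]
  · rw [Finset.erase_eq_self.mpr hk, Finset.card_insert_of_notMem hk]

-- the worklist loop computes length − number of distinct keys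
lemma dmGo_eq (xs : List (List Int)) (dup : Int) :
    dmGo xs dup = dup + (xs.length : Int) - (xs.toFinset.card : Int) := by
  match xs with
  | [] => rw [dmGo.eq_def]; simp
  | k :: t =>
    have ih := dmGo_eq (t.filter (fun x => x != k))
      (dup + (((k :: t).length : Int) - 1 - ((t.filter (fun x => x != k)).length : Int)))
    rw [dmGo.eq_def]
    simp only []
    rw [ih, card_cons_filter k t]
    simp only [List.length_cons]
    push_cast
    ring
termination_by xs.length
decreasing_by
  simp only [List.length_cons]
  exact Nat.lt_succ_of_le (List.length_filter_le _ _)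

-- ===== VERDICT (by name: the statement is the Claim_ definition above) =====
theorem dependency_measure_spec : Claim_equal_dependency_measure := by
  intro X team _
  unfold Spec_dependency_measure dependency_measure dependency_measure_alt
  rw [dmGo_eq, dedup_loop_eq_setOfList]
  simp [len_ofList_eq_card]
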